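-- pv_equiv track=rewrite | github.com/renzvos/mysql-dev | automation/arsenal/arsenal-upload.py | RemoveSourceFromAddress
-- ===== SOURCE A (Python) =====
-- def RemoveSourceFromAddress(source,addr):
--    sourceaddr = source.split("/")
--    cleanaddr = []
--    for i in range(len(addr)):
--       try:
--           if sourceaddr[i] != addr[i]:
--               cleanaddr.append(addr[i])
--       except:
--           cleanaddr.append(addr[i])
--    return cleanaddr
-- ===== SOURCE B (Python) =====
-- def RemoveSourceFromAddress(source, addr):
--     out = list(addr)
--     for i, s in reversed(list(enumerate(source.split("/")))):
--         if i < len(out) and s == out[i]: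
--             del out[i]
--     return out
-- ===== Notes on version B (the rewrite author's own statement) =====
-- stated objective: alternative
-- what changed: Instead of scanning addr and appending the mismatching elements, B copies addr in one C-level list() call and walks the source parts in reverse, deleting from the copy each position whose part equals the element there; reverse order keeps pending indices stable under deletion.
import Mathlib
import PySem

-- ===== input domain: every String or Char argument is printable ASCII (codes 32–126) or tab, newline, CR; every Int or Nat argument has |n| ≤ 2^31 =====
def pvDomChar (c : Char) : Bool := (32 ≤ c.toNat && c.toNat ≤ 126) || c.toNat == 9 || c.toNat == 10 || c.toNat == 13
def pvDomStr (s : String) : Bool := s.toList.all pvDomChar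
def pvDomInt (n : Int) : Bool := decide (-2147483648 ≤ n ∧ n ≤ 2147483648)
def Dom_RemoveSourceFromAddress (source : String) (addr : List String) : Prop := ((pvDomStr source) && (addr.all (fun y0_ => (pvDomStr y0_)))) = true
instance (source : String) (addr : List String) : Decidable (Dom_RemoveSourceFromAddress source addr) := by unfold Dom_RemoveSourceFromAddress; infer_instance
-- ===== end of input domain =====

-- B replaces A's append-the-mismatches index loop over addr by the reverse strategy: copy addr and,
-- walking the source parts in reverse, delete each position whose part equals the element there (alternative decomposition).

-- ===== PORT A =====
def RemoveSourceFromAddress (source : String) (addr : List String) : List String :=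
  let sourceaddr := (PySem.Str.split? source "/").getD []
  (PySem.List.pyRange 0 (addr.length : Int) 1).foldl (fun cleanaddr i =>
    -- try: index sourceaddr[i]; except (IndexError): append addr[i]
    match PySem.List.pyGet? sourceaddr i with
    | some s => if s ≠ PySem.List.pyGetD addr i "" then cleanaddr ++ [PySem.List.pyGetD addr i ""] else cleanaddr
    | none => cleanaddr ++ [PySem.List.pyGetD addr i ""]) []

-- ===== PORT B =====
-- list(enumerate(xs)) starting at n
def pvEnum (n : Nat) : List String → List (Nat × String)
  | [] => []
  | x :: xs => (n, x) :: pvEnum (n + 1) xs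

def RemoveSourceFromAddress_alt (source : String) (addr : List String) : List String :=
  let parts := (PySem.Str.split? source "/").getD []
  -- for i, s in reversed(list(enumerate(parts))): if i < len(out) and s == out[i]: del out[i]
  ((pvEnum 0 parts).reverse).foldl
    (fun out p => if out[p.1]? = some p.2 then out.eraseIdx p.1 else out) addr

-- ===== PRECONDITION & SPEC =====
def Spec_RemoveSourceFromAddress (source : String) (addr : List String) (out : List String) : Prop := out = RemoveSourceFromAddress_alt source addr
instance (source : String) (addr : List String) (out : List String) : Decidable (Spec_RemoveSourceFromAddress source addr out) := by unfold Spec_RemoveSourceFromAddress; infer_instance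

-- ===== CLAIM (what is proved, stated in full; the proofs are below) =====
def Claim_equal_RemoveSourceFromAddress : Prop := ∀ (source : String) (addr : List String), Dom_RemoveSourceFromAddress source addr → Spec_RemoveSourceFromAddress source addr (RemoveSourceFromAddress source addr)

-- ===== LEMMAS AND PROOFS =====

-- The elements kept: mismatching positions of the common prefix, then the uncovered tail.
def pvKeep (s l : List String) : List String :=
  ((s.zip l).filter (fun p => p.1 ≠ p.2)).map Prod.snd ++ l.drop s.length

lemma pvKeep_nil_right (s : List String) : pvKeep s [] = [] := by
  cases s <;> simp [pvKeep]

lemma pvKeep_cons (x y : String) (xs ys : List String) :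
    pvKeep (x :: xs) (y :: ys) = if x = y then pvKeep xs ys else y :: pvKeep xs ys := by
  by_cases h : x = y <;> simp [pvKeep, h]

-- The list of (sourceaddr[i] as Option, addr[i]) pairs A's loop inspects, characterised as prefix-zip ++ tail.
lemma pvPairList (s a : List String) :
    (PySem.List.pyRange 0 (a.length : Int) 1).map
        (fun i => (PySem.List.pyGet? s i, PySem.List.pyGetD a i "")) =
      (s.zip a).map (fun p => (some p.1, p.2)) ++
        (a.drop s.length).map (fun x => ((none : Option String), x)) := by
  apply List.ext_getElem
  · simp [PySem.List.length_pyRange_one]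
    omega
  · intro k h1 h2
    have hk : k < a.length := by
      simpa [PySem.List.length_pyRange_one] using h1
    rw [List.getElem_map, PySem.List.getElem_pyRange_one]
    simp only [zero_add]
    by_cases hks : k < s.length
    · rw [List.getElem_append_left (by simp [List.length_zip]; omega)]
      simp [PySem.List.pyGet?_natCast, List.getElem?_eq_getElem (by omega : k < s.length),
        List.getD_eq_getElem?_getD, List.getElem?_eq_getElem hk]
    · rw [List.getElem_append_right (by simp [List.length_zip]; omega)]
      have hnone : PySem.List.pyGet? s (k : Int) = none := by
        simp [PySem.List.pyGet?_natCast, List.getElem?_eq_none (by omega : s.length ≤ k)]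
      simp [hnone, List.length_zip, List.getD_eq_getElem?_getD, List.getElem?_eq_getElem hk]
      congr 1
      omega

lemma pvFoldZip (l : List (String × String)) (acc : List String) :
    l.foldl (fun c p => if p.1 ≠ p.2 then c ++ [p.2] else c) acc =
      acc ++ (l.filter (fun p => p.1 ≠ p.2)).map Prod.snd := by
  induction l generalizing acc with
  | nil => simp
  | cons x xs ih =>
    rw [List.foldl_cons, ih]
    by_cases h : x.1 = x.2 <;> simp [h]

lemma pvFoldTail (l : List String) (acc : List String) :
    l.foldl (fun c x => c ++ [x]) acc = acc ++ l := by
  induction l generalizing acc with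
  | nil => simp
  | cons x xs ih => simp [List.foldl_cons, ih]

-- B's reverse-deletion pass, processed as a foldr over the enumeration: deleting the matches at
-- positions ≥ n leaves a.take n untouched and keeps exactly pvKeep s (a.drop n) beyond it.
lemma pvEraseMid (l r : List String) (x : String) :
    (l ++ x :: r).eraseIdx l.length = l ++ r := by
  induction l with
  | nil => rfl
  | cons y ys ih => simpa using ih

lemma pvDel (s : List String) (n : Nat) (a : List String) :
    (pvEnum n s).foldr
        (fun p out => if out[p.1]? = some p.2 then out.eraseIdx p.1 else out) a =
      a.take n ++ pvKeep s (a.drop n) := by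
  induction s generalizing n with
  | nil => simp [pvEnum, pvKeep]
  | cons x xs ih =>
    rw [pvEnum, List.foldr_cons, ih (n + 1)]
    by_cases hn : n < a.length
    · have htake : a.take (n + 1) = a.take n ++ [a[n]] := by
        rw [List.take_add_one, List.getElem?_eq_getElem hn]; rfl
      have hdrop : a.drop n = a[n] :: a.drop (n + 1) :=
        List.drop_eq_getElem_cons hn
      have hlen : (a.take n).length = n := by simp; omega
      rw [htake, List.append_assoc, List.singleton_append]
      have hget : (a.take n ++ a[n] :: pvKeep xs (a.drop (n + 1)))[n]? = some a[n] := by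
        rw [List.getElem?_append_right (by omega : (a.take n).length ≤ n)]
        simp [hlen]
      rw [hget]
      by_cases hx : a[n] = x
      · have he := pvEraseMid (a.take n) (pvKeep xs (a.drop (n + 1))) a[n]
        rw [hlen] at he
        rw [if_pos (by rw [hx]), show ((n, x).1 : Nat) = n from rfl, he,
          hdrop, pvKeep_cons, if_pos hx.symm]
      · rw [if_neg (by simp [hx])]
        rw [hdrop, pvKeep_cons, if_neg (fun h => hx h.symm)]
    · have hle : a.length ≤ n := by omega
      have ht1 : a.take (n + 1) = a := List.take_of_length_le (by omega)
      have hd1 : a.drop (n + 1) = [] := List.drop_eq_nil_of_le (by omega)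
      have hd0 : a.drop n = [] := List.drop_eq_nil_of_le hle
      rw [ht1, hd1, pvKeep_nil_right, List.append_nil]
      rw [List.getElem?_eq_none hle]
      simp [List.take_of_length_le hle, hd0, pvKeep_nil_right]

-- ===== VERDICT (by name: the statement is the Claim_ definition above) =====
theorem RemoveSourceFromAddress_spec : Claim_equal_RemoveSourceFromAddress := by
  intro source addr _
  unfold Spec_RemoveSourceFromAddress RemoveSourceFromAddress RemoveSourceFromAddress_alt
  set s := (PySem.Str.split? source "/").getD [] with hs
  rw [show (PySem.List.pyRange 0 (addr.length : Int) 1).foldl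
        (fun cleanaddr i =>
          match PySem.List.pyGet? s i with
          | some t => if t ≠ PySem.List.pyGetD addr i "" then cleanaddr ++ [PySem.List.pyGetD addr i ""] else cleanaddr
          | none => cleanaddr ++ [PySem.List.pyGetD addr i ""]) [] =
      ((PySem.List.pyRange 0 (addr.length : Int) 1).map
        (fun i => (PySem.List.pyGet? s i, PySem.List.pyGetD addr i ""))).foldl
        (fun cleanaddr q =>
          match q.1 with
          | some t => if t ≠ q.2 then cleanaddr ++ [q.2] else cleanaddr
          | none => cleanaddr ++ [q.2]) []
      from by rw [List.foldl_map]]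
  rw [pvPairList s addr, List.foldl_append, List.foldl_map, List.foldl_map]
  simp only []
  rw [pvFoldZip, pvFoldTail, List.nil_append]
  rw [List.foldl_reverse, pvDel s 0 addr]
  simp [pvKeep]
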